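-- pv_equiv track=rewrite | github.com/sgGuerra/EjercicioValidadorClave-copia | validadorclave/modelo/validador.py | contiene_calisto
-- ===== SOURCE A (Python) =====
-- def contiene_calisto(clave: str) -> bool:
--     palabra = "calisto"
--     clave_temp: str = clave.lower()
--     calisto_index = 0
--     while calisto_index < len(clave):
--         calisto_index = clave_temp.find(palabra, calisto_index)
--         # si encontro la palabra
--         if calisto_index > -1:
--             # slice(revanado)
--             pi = calisto_index
--             pf = calisto_index + len(palabra)
--             calisto_str = clave[pi:pf]
--
--             contador_mayusculas = 0
--
--             for letra in calisto_str:
--                 if letra.isupper():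
--                     contador_mayusculas += 1
--
--             if 2 <= contador_mayusculas < len(palabra):
--                 return  True
--             else:
--                 calisto_index = pf
--         else:
--             return False
--
--     return False
-- ===== SOURCE B (Python) =====
-- def contiene_calisto(clave: str) -> bool:
--     pal = list("calisto")
--     window = []      # sliding window: the last <= 7 characters as (lowered, was_upper)
--     mayusculas = 0   # running count of uppercase letters inside the window
--     for ch in clave:
--         window.append((ch.lower(), ch.isupper()))
--         if ch.isupper():
--             mayusculas += 1
--         if len(window) > 7:
--             viejo = window.pop(0)
--             if viejo[1]:
--                 mayusculas -= 1
--         if [c for c, _ in window] == pal and 2 <= mayusculas < 7: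
--             return True
--     return False
-- ===== Notes on version B (the rewrite author's own statement) =====
-- stated objective: alternative
-- what changed: Replaced A's find-and-jump substring search over the lowered copy (recounting uppercase letters in every matched slice) by a single streaming pass that maintains a 7-character sliding window of (lowered char, was-upper) pairs and an incrementally updated uppercase count, testing the window against the pattern at each step.
import Mathlib
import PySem

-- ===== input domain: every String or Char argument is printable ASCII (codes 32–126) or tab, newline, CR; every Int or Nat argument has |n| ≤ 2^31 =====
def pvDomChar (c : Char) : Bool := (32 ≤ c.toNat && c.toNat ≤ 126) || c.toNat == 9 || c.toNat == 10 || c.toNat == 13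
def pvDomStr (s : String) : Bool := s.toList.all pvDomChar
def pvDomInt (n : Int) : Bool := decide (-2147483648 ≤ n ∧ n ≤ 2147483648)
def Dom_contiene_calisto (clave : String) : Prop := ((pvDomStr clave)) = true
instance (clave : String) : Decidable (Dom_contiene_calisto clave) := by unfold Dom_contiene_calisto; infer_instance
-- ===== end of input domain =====

-- B replaces A's find-and-jump substring search (which recounts uppercase in every matched
-- slice) by one streaming pass maintaining a 7-character sliding window with an incrementally
-- updated uppercase count; objective: alternative (same return value; no speed claim).

-- palabra = "calisto"
def pvPal : List Char := ['c', 'a', 'l', 'i', 's', 't', 'o']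

-- ===== PORT A =====
-- the while loop of A, as fuel recursion; fuel = len(clave)+1 suffices because the
-- index strictly increases by at least 7 on every iteration that does not return
def pvGoA (cs low : List Char) (fuel : Nat) (idx : Int) : Bool :=
  match fuel with
  | 0 => false
  | fuel + 1 =>
    if idx < PySem.Chars.len cs then
      let j := PySem.Chars.findFrom low pvPal idx none
      if j > -1 then
        -- calisto_str = clave[pi:pf]
        let calistoStr := PySem.List.slice cs (some j) (some (j + PySem.Chars.len pvPal))
        -- the counting for-loop
        let cnt : Int := calistoStr.foldl (fun acc c => if PySem.Chars.isupper c then acc + 1 else acc) 0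
        if 2 ≤ cnt ∧ cnt < PySem.Chars.len pvPal then true
        else pvGoA cs low fuel (j + PySem.Chars.len pvPal)
      else false
    else false

def contiene_calisto (clave : String) : Bool :=
  pvGoA clave.toList (PySem.Chars.lower clave.toList) (clave.toList.length + 1) 0

-- ===== PORT B =====
-- the for-loop of Source B: window of (lowered char, was-upper) pairs, running uppercase count
def pvGoB : List Char → List (Char × Bool) → Int → Bool
  | [], _, _ => false
  | ch :: rest, window, mayus =>
    -- window.append((ch.lower(), ch.isupper())); if ch.isupper(): mayusculas += 1
    let window1 := window ++ [(PySem.Chars.lowerChar ch, PySem.Chars.isupper ch)]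
    let mayus1 := if PySem.Chars.isupper ch then mayus + 1 else mayus
    -- if len(window) > 7: viejo = window.pop(0); if viejo[1]: mayusculas -= 1
    -- (pop(0) on the guarded nonempty list = its head plus its tail: exact here)
    let st :=
      if 7 < window1.length then
        (window1.tail,
          if (window1.head?.map Prod.snd).getD false then mayus1 - 1 else mayus1)
      else (window1, mayus1)
    -- if [c for c, _ in window] == pal and 2 <= mayusculas < 7: return True
    if (st.1.map Prod.fst == pvPal) && decide (2 ≤ st.2 ∧ st.2 < 7) then true
    else pvGoB rest st.1 st.2

def contiene_calisto_alt (clave : String) : Bool :=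
  pvGoB clave.toList [] 0

-- ===== PRECONDITION & SPEC =====
def Spec_contiene_calisto (clave : String) (out : Bool) : Prop := out = contiene_calisto_alt clave
instance (clave : String) (out : Bool) : Decidable (Spec_contiene_calisto clave out) := by unfold Spec_contiene_calisto; infer_instance

-- ===== CLAIM (what is proved, stated in full; the proofs are below) =====
def Claim_equal_contiene_calisto : Prop := ∀ (clave : String), Dom_contiene_calisto clave → Spec_contiene_calisto clave (contiene_calisto clave)

-- ===== LEMMAS AND PROOFS =====

-- the per-position predicate shared by both characterisations
def pvQ (cs : List Char) (i : Nat) : Bool :=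
  PySem.Chars.startswith ((PySem.Chars.lower cs).drop i) pvPal &&
  decide (2 ≤ (PySem.List.slice cs (some (i : Int)) (some ((i : Int) + 7))).countP
            (fun c => PySem.Chars.isupper c) ∧
          (PySem.List.slice cs (some (i : Int)) (some ((i : Int) + 7))).countP
            (fun c => PySem.Chars.isupper c) < 7)

lemma pvLower_length (cs : List Char) : (PySem.Chars.lower cs).length = cs.length := by
  show (cs.map PySem.Chars.lowerChar).length = cs.length
  simp

-- an occurrence of "calisto" needs 7 characters
lemma pvOcc_bound {s : List Char} {i : Nat} (h : pvPal <+: s.drop i) : i + 7 ≤ s.length := by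
  have h1 : pvPal.length ≤ (s.drop i).length := h.length_le
  simp [pvPal] at h1
  omega

-- "calisto" has no self-overlap: two occurrences are at least 7 apart
lemma pvNoOverlap {s : List Char} {p q : Nat} (hp : pvPal <+: s.drop p)
    (hq : pvPal <+: s.drop q) (hlt : p < q) : p + 7 ≤ q := by
  by_contra hcon
  obtain ⟨d, hd1, hd6, hq'⟩ : ∃ d, 1 ≤ d ∧ d ≤ 6 ∧ q = p + d := ⟨q - p, by omega, by omega, by omega⟩
  obtain ⟨rest, hrest⟩ := hp
  have hdropq : s.drop q = pvPal.drop d ++ rest := by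
    have : s.drop q = (s.drop p).drop d := by
      rw [List.drop_drop, hq', Nat.add_comm p d]
    rw [this, ← hrest, List.drop_append_of_le_length (by simp [pvPal]; try omega)]
  obtain ⟨t, ht⟩ := hq
  rw [hdropq] at ht
  have hkey : pvPal.take (7 - d) = pvPal.drop d := by
    have h1 : (pvPal ++ t).take (7 - d) = pvPal.take (7 - d) := by
      rw [List.take_append_of_le_length (by simp [pvPal]; try omega)]
    have h2 : (pvPal.drop d ++ rest).take (7 - d) = pvPal.drop d := by
      rw [List.take_append_of_le_length (by simp [pvPal]; try omega),
        List.take_of_length_le (by simp [pvPal])]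
    rw [← h1, ht, h2]
  interval_cases d <;> exact absurd hkey (by decide)

-- the counting for-loop computes countP
lemma pvFold_count (l : List Char) :
    l.foldl (fun acc c => if PySem.Chars.isupper c then acc + 1 else acc) (0 : Int)
      = (l.countP (fun c => PySem.Chars.isupper c) : Int) := by
  have aux : ∀ (l : List Char) (n : Int),
      l.foldl (fun acc c => if PySem.Chars.isupper c then acc + 1 else acc) n
        = n + (l.countP (fun c => PySem.Chars.isupper c) : Int) := by
    intro l
    induction l with
    | nil => simp
    | cons c l ih =>
      intro n
      simp only [List.foldl_cons, List.countP_cons, ih]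
      split_ifs with hc
      · push_cast; ring
      · push_cast; ring
  simpa using aux l 0

-- a qualifying position is an occurrence of "calisto" in the lowered string
lemma pvQ_occ {cs : List Char} {i : Nat} (h : pvQ cs i = true) :
    pvPal <+: (PySem.Chars.lower cs).drop i := by
  simp only [pvQ, Bool.and_eq_true] at h
  exact (PySem.Chars.startswith_iff _ _).1 h.1

-- past the end of the string nothing qualifies
lemma pvQ_none {cs : List Char} {n : Nat} (hle : cs.length ≤ n) :
    ¬ ∃ i, n ≤ i ∧ pvQ cs i = true := by
  rintro ⟨i, hni, hQi⟩
  have := pvOcc_bound (pvQ_occ hQi)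
  rw [pvLower_length] at this
  omega

-- loop invariant: A's loop from index n decides "some position ≥ n qualifies"
lemma pvGoA_eq (cs : List Char) (fuel n : Nat) (h : cs.length ≤ n + 7 * fuel) :
    pvGoA cs (PySem.Chars.lower cs) fuel (n : Int) = true ↔ ∃ i, n ≤ i ∧ pvQ cs i = true := by
  induction fuel generalizing n with
  | zero =>
    simp only [pvGoA, Bool.false_eq_true, false_iff]
    exact pvQ_none (by omega)
  | succ fuel ih =>
    have hlowlen : (PySem.Chars.lower cs).length = cs.length := pvLower_length cs
    have hlen7 : PySem.Chars.len pvPal = 7 := by simp [PySem.Chars.len_eq, pvPal]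
    by_cases hn : n < cs.length
    · have hk : n ≤ (PySem.Chars.lower cs).length := by omega
      by_cases hj : PySem.Chars.findFrom (PySem.Chars.lower cs) pvPal (n : Int) = -1
      · -- find returned -1 : no occurrence at or after n
        have hnone : ¬ pvPal <:+: (PySem.Chars.lower cs).drop n :=
          (PySem.Chars.findFrom_natCast_eq_neg_one_iff _ pvPal n hk).1 hj
        have hstep : pvGoA cs (PySem.Chars.lower cs) (fuel + 1) (n : Int) = false := by
          simp only [pvGoA]
          rw [if_pos (by rw [PySem.Chars.len_eq]; exact_mod_cast hn), hj]
          simp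
        rw [hstep]
        simp only [Bool.false_eq_true, false_iff]
        rintro ⟨i, hni, hQi⟩
        have hocc := pvQ_occ hQi
        have : pvPal <+: ((PySem.Chars.lower cs).drop n).drop (i - n) := by
          rw [List.drop_drop]
          have : n + (i - n) = i := by omega
          rw [this]
          exact hocc
        exact hnone ((PySem.Chars.isIn_iff_infix _ _).1
          ((PySem.Chars.exists_prefix_drop_iff_isIn _ _).1 ⟨i - n, this⟩))
      · -- find returned an occurrence J = m ≥ n
        obtain ⟨hge, hpre, hmin⟩ :=
          PySem.Chars.findFrom_natCast_spec (PySem.Chars.lower cs) pvPal n hk hj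
        set J := PySem.Chars.findFrom (PySem.Chars.lower cs) pvPal (n : Int) with hJ
        have hJ0 : (0 : Int) ≤ J := le_trans (by positivity) hge
        set m := J.toNat with hm
        have hJm : J = (m : Int) := (Int.toNat_of_nonneg hJ0).symm
        have hnm : n ≤ m := by
          rw [hJm] at hge
          exact_mod_cast hge
        have hslice : PySem.List.slice cs (some (m : Int)) (some ((m : Int) + 7))
            = (cs.drop m).take 7 := by
          simpa using PySem.List.slice_natCast_add cs m 7
        have hstep : pvGoA cs (PySem.Chars.lower cs) (fuel + 1) (n : Int) =
            (if 2 ≤ ((cs.drop m).take 7).countP (fun c => PySem.Chars.isupper c) ∧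
                ((cs.drop m).take 7).countP (fun c => PySem.Chars.isupper c) < 7 then true
             else pvGoA cs (PySem.Chars.lower cs) fuel (((m + 7 : Nat)) : Int)) := by
          simp only [pvGoA]
          rw [if_pos (by rw [PySem.Chars.len_eq]; exact_mod_cast hn), ← hJ]
          rw [if_pos (by omega : J > -1), hJm, hlen7, hslice, pvFold_count]
          have hiff : ((2 : Int) ≤ (((cs.drop m).take 7).countP (fun c => PySem.Chars.isupper c) : Int) ∧
              (((cs.drop m).take 7).countP (fun c => PySem.Chars.isupper c) : Int) < 7) ↔
              (2 ≤ ((cs.drop m).take 7).countP (fun c => PySem.Chars.isupper c) ∧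
              ((cs.drop m).take 7).countP (fun c => PySem.Chars.isupper c) < 7) := by
            constructor <;> (rintro ⟨h1, h2⟩; exact ⟨by exact_mod_cast h1, by exact_mod_cast h2⟩)
          rw [if_congr hiff rfl rfl]
          rw [show ((m : Int) + 7) = (((m + 7 : Nat)) : Int) by push_cast; ring]
        rw [hstep]
        by_cases hgood : 2 ≤ ((cs.drop m).take 7).countP (fun c => PySem.Chars.isupper c) ∧
            ((cs.drop m).take 7).countP (fun c => PySem.Chars.isupper c) < 7
        · rw [if_pos hgood]
          simp only [true_iff]
          refine ⟨m, hnm, ?_⟩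
          simp only [pvQ, Bool.and_eq_true, decide_eq_true_eq]
          rw [hslice]
          exact ⟨(PySem.Chars.startswith_iff _ _).2 hpre, hgood⟩
        · rw [if_neg hgood, ih (m + 7) (by omega)]
          constructor
          · rintro ⟨i, hi, hQ⟩
            exact ⟨i, by omega, hQ⟩
          · rintro ⟨i, hi, hQ⟩
            have hocc := pvQ_occ hQ
            rcases lt_trichotomy i m with hlt | heq | hgt
            · exact absurd hocc (hmin i hi hlt)
            · subst heq
              simp only [pvQ, Bool.and_eq_true, decide_eq_true_eq] at hQ
              rw [hslice] at hQ
              exact absurd hQ.2 hgood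
            · exact ⟨i, pvNoOverlap hpre hocc hgt, hQ⟩
    · have hstep : pvGoA cs (PySem.Chars.lower cs) (fuel + 1) (n : Int) = false := by
        simp only [pvGoA]
        rw [if_neg (by rw [PySem.Chars.len_eq]; exact_mod_cast hn)]
      rw [hstep]
      simp only [Bool.false_eq_true, false_iff]
      exact pvQ_none (by omega)

-- ----- B-side: the sliding-window invariant -----

-- the (lowered, was-upper) pair of a character
def pvPair (c : Char) : Char × Bool := (PySem.Chars.lowerChar c, PySem.Chars.isupper c)

-- the window after processing the first k characters
def pvWin (cs : List Char) (k : Nat) : List (Char × Bool) :=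
  ((cs.take k).map pvPair).drop (k - 7)

lemma pvWin_length (cs : List Char) (k : Nat) (hk : k ≤ cs.length) :
    (pvWin cs k).length = k - (k - 7) := by
  simp [pvWin, List.length_take, Nat.min_eq_left hk]

-- the window is the mapped 7-slice at position k-7 (for 7 ≤ k ≤ len)
lemma pvWin_eq_slice (cs : List Char) (k : Nat) (h7 : 7 ≤ k) :
    pvWin cs k = ((cs.drop (k - 7)).take 7).map pvPair := by
  rw [pvWin, ← List.map_drop, List.drop_take, show k - (k - 7) = 7 by omega]

-- pvQ restated on windows
lemma pvQ_eq_win (cs : List Char) (i : Nat) :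
    pvQ cs i = (((pvWin cs (i + 7)).map Prod.fst == pvPal) &&
      decide (2 ≤ ((pvWin cs (i + 7)).countP (fun w => w.2) : Int) ∧
              ((pvWin cs (i + 7)).countP (fun w => w.2) : Int) < 7)) := by
  have hwin : pvWin cs (i + 7) = ((cs.drop i).take 7).map pvPair := by
    rw [pvWin_eq_slice cs (i + 7) (by omega), show i + 7 - 7 = i by omega]
  have hfst : (pvWin cs (i + 7)).map Prod.fst = PySem.Chars.lower ((cs.drop i).take 7) := by
    rw [hwin, List.map_map]
    rfl
  have hcnt : (pvWin cs (i + 7)).countP (fun w => w.2)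
      = ((cs.drop i).take 7).countP (fun c => PySem.Chars.isupper c) := by
    rw [hwin, List.countP_map]
    rfl
  have hslice : PySem.List.slice cs (some (i : Int)) (some ((i : Int) + 7))
      = (cs.drop i).take 7 := by
    simpa using PySem.List.slice_natCast_add cs i 7
  have hlow : PySem.Chars.lower ((cs.drop i).take 7)
      = ((PySem.Chars.lower cs).drop i).take 7 := by
    show ((cs.drop i).take 7).map _ = ((cs.map _).drop i).take 7
    rw [List.map_take, List.map_drop]
  have hsw : PySem.Chars.startswith ((PySem.Chars.lower cs).drop i) pvPal
      = (PySem.Chars.lower ((cs.drop i).take 7) == pvPal) := by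
    rw [Bool.eq_iff_iff, PySem.Chars.startswith_iff, beq_iff_eq, hlow]
    constructor
    · intro hpre
      have := List.prefix_iff_eq_take.1 hpre
      simpa [pvPal] using this.symm
    · intro heq
      exact List.prefix_iff_eq_take.2 (by simpa [pvPal] using heq.symm)
  rw [pvQ, hsw, hfst, hcnt, hslice]
  congr 1
  rw [Bool.eq_iff_iff]
  simp only [decide_eq_true_eq]
  constructor <;> (rintro ⟨h1, h2⟩; exact ⟨by exact_mod_cast h1, by exact_mod_cast h2⟩)

-- one step of the loop body sends the state at k to the state at k+1
lemma pvWin_step (cs : List Char) (k : Nat) (ch : Char) (hd : cs.drop k = ch :: cs.drop (k + 1)) 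
    (hk : k < cs.length) :
    pvWin cs k ++ [pvPair ch] = ((cs.take (k + 1)).map pvPair).drop (k - 7) := by
  have htake : cs.take (k + 1) = cs.take k ++ [ch] := by
    rw [List.take_add_one]
    congr 1
    have : cs[k]? = some ch := by
      have := congrArg List.head? hd
      simpa [List.head?_drop] using this
    simp [this]
  rw [htake, List.map_append, pvWin, List.drop_append_of_le_length]
  · simp
  · simp [Nat.min_eq_left (le_of_lt hk)]

-- the main invariant: the streaming loop from position k decides
-- "some position i with i + 7 > k qualifies"
lemma pvGoB_eq (cs : List Char) : ∀ (rest : List Char) (k : Nat), cs.drop k = rest →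
    (pvGoB rest (pvWin cs k) ((pvWin cs k).countP (fun w => w.2) : Int) = true ↔
      ∃ i, k < i + 7 ∧ pvQ cs i = true) := by
  intro rest
  induction rest with
  | nil =>
    intro k hdrop
    have hlen : cs.length ≤ k := by
      by_contra h
      have := congrArg List.length hdrop
      simp [List.length_drop] at this
      omega
    simp only [pvGoB, Bool.false_eq_true, false_iff]
    rintro ⟨i, hi, hQ⟩
    have := pvOcc_bound (pvQ_occ hQ)
    rw [pvLower_length] at this
    omega
  | cons ch rest ih =>
    intro k hdrop
    have hk : k < cs.length := by
      by_contra h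
      rw [List.drop_eq_nil_of_le (by omega)] at hdrop
      simp at hdrop
    have hrest : cs.drop (k + 1) = rest := by
      have := congrArg List.tail hdrop
      simpa [List.tail_drop] using this
    have hd : cs.drop k = ch :: cs.drop (k + 1) := by rw [hrest]; exact hdrop
    have happ : pvWin cs k ++ [pvPair ch] = ((cs.take (k + 1)).map pvPair).drop (k - 7) :=
      pvWin_step cs k ch hd hk
    have hwlen : (pvWin cs k).length = k - (k - 7) := pvWin_length cs k (le_of_lt hk)
    -- the incremented count is the count of the appended window
    have hm1 : (if PySem.Chars.isupper ch = true
          then ((pvWin cs k).countP (fun w => w.2) : Int) + 1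
          else ((pvWin cs k).countP (fun w => w.2) : Int))
        = ((pvWin cs k ++ [pvPair ch]).countP (fun w => w.2) : Int) := by
      simp only [List.countP_append, List.countP_cons, List.countP_nil, pvPair]
      split_ifs <;> push_cast <;> ring
    -- the loop body sends the state at k to the state at k+1
    have hstate : (if 7 < (pvWin cs k ++ [pvPair ch]).length then
          ((pvWin cs k ++ [pvPair ch]).tail,
            if ((pvWin cs k ++ [pvPair ch]).head?.map Prod.snd).getD false = true
            then (if PySem.Chars.isupper ch = true
                    then ((pvWin cs k).countP (fun w => w.2) : Int) + 1
                    else ((pvWin cs k).countP (fun w => w.2) : Int)) - 1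
            else (if PySem.Chars.isupper ch = true
                    then ((pvWin cs k).countP (fun w => w.2) : Int) + 1
                    else ((pvWin cs k).countP (fun w => w.2) : Int)))
        else (pvWin cs k ++ [pvPair ch],
              if PySem.Chars.isupper ch = true
                then ((pvWin cs k).countP (fun w => w.2) : Int) + 1
                else ((pvWin cs k).countP (fun w => w.2) : Int)))
        = (pvWin cs (k + 1), ((pvWin cs (k + 1)).countP (fun w => w.2) : Int)) := by
      by_cases h7 : 7 ≤ k
      · -- pop branch: the appended window has length 8
        have hlen1 : (pvWin cs k ++ [pvPair ch]).length = 8 := by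
          simp [hwlen]; omega
        rw [if_pos (by omega)]
        rcases hwn : pvWin cs k ++ [pvPair ch] with _ | ⟨viejo, ws⟩
        · rw [hwn] at hlen1; simp at hlen1
        · have hws : ws = pvWin cs (k + 1) := by
            have ht : (viejo :: ws).tail = (((cs.take (k + 1)).map pvPair).drop (k - 7)).tail := by
              rw [← hwn, happ]
            simp only [List.tail_cons] at ht
            rw [ht, List.tail_drop, pvWin]
            congr 1
            omega
          have hcnt1 : (pvWin cs k ++ [pvPair ch]).countP (fun w => w.2)
              = (if viejo.2 = true then 1 else 0) + ws.countP (fun w => w.2) := by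
            rw [hwn, List.countP_cons]
            split_ifs <;> simp_all <;> omega
          simp only [List.tail_cons, List.head?_cons, Option.map_some, Option.getD_some,
            Prod.mk.injEq]
          refine ⟨hws, ?_⟩
          rw [hm1, hcnt1, hws]
          split_ifs <;> push_cast <;> ring
      · -- no pop: the appended window has length k+1 ≤ 7
        have hlen1 : (pvWin cs k ++ [pvPair ch]).length = k + 1 := by
          simp [hwlen]; omega
        rw [if_neg (by omega)]
        have hw1 : pvWin cs k ++ [pvPair ch] = pvWin cs (k + 1) := by
          rw [happ, pvWin]
          congr 1
          omega
        rw [Prod.mk.injEq]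
        exact ⟨hw1, by rw [hm1, hw1]⟩
    -- unfold one step of pvGoB and rewrite the state
    show pvGoB (ch :: rest) (pvWin cs k) ((pvWin cs k).countP (fun w => w.2) : Int) = true ↔ _
    simp only [pvGoB]
    simp only [show (PySem.Chars.lowerChar ch, PySem.Chars.isupper ch) = pvPair ch from rfl]
    rw [hstate]
    dsimp only
    -- the test at k+1 is pvQ at position k+1-7 (when k+1 ≥ 7)
    have htest : (((pvWin cs (k + 1)).map Prod.fst == pvPal) &&
        decide (2 ≤ ((pvWin cs (k + 1)).countP (fun w => w.2) : Int) ∧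
                ((pvWin cs (k + 1)).countP (fun w => w.2) : Int) < 7)) = true
        ↔ (7 ≤ k + 1 ∧ pvQ cs (k + 1 - 7) = true) := by
      by_cases h7 : 7 ≤ k + 1
      · have heq : k + 1 - 7 + 7 = k + 1 := by omega
        rw [← heq, ← pvQ_eq_win, heq]
        exact ⟨fun h => ⟨h7, h⟩, fun h => h.2⟩
      · have hlen1 : (pvWin cs (k + 1)).length = k + 1 := by
          rw [pvWin_length cs (k + 1) (by omega)]; omega
        constructor
        · intro h
          exfalso
          simp only [Bool.and_eq_true, beq_iff_eq] at h
          have := congrArg List.length h.1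
          simp [hlen1, pvPal] at this
          omega
        · rintro ⟨h, -⟩; omega
    by_cases hc : (((pvWin cs (k + 1)).map Prod.fst == pvPal) &&
        decide (2 ≤ ((pvWin cs (k + 1)).countP (fun w => w.2) : Int) ∧
                ((pvWin cs (k + 1)).countP (fun w => w.2) : Int) < 7)) = true
    · rw [if_pos hc]
      obtain ⟨h7, hQ⟩ := htest.1 hc
      simp only [true_iff]
      exact ⟨k + 1 - 7, by omega, hQ⟩
    · rw [if_neg hc, ih (k + 1) hrest]
      constructor
      · rintro ⟨i, hi, hQ⟩
        exact ⟨i, by omega, hQ⟩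
      · rintro ⟨i, hi, hQ⟩
        rcases Nat.lt_or_ge k (i + 6) with hlt | hge
        · exact ⟨i, by omega, hQ⟩
        · have hik : i = k + 1 - 7 ∧ 7 ≤ k + 1 := by omega
          exact absurd (htest.2 ⟨hik.2, hik.1 ▸ hQ⟩) hc

-- ===== VERDICT (by name: the statement is the Claim_ definition above) =====
theorem contiene_calisto_spec : Claim_equal_contiene_calisto := by
  intro clave _
  unfold Spec_contiene_calisto contiene_calisto contiene_calisto_alt
  rw [Bool.eq_iff_iff]
  have hA := pvGoA_eq clave.toList (clave.toList.length + 1) 0 (by omega)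
  have hB := pvGoB_eq clave.toList clave.toList 0 (by simp)
  rw [show pvWin clave.toList 0 = [] from rfl] at hB
  simp only [Nat.cast_zero, List.countP_nil] at hA hB
  rw [hA, hB]
  constructor
  · rintro ⟨i, -, hQ⟩
    exact ⟨i, by omega, hQ⟩
  · rintro ⟨i, -, hQ⟩
    exact ⟨i, Nat.zero_le _, hQ⟩
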